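-- pv_equiv track=rewrite | github.com/ian-quinn/ZonalModel | VEPZO/Scripts/mesh.py | PileUpList
-- ===== SOURCE A (Python) =====
-- def PileUpList(flatlist, dimx, dimy):
-- 	reclist = []
-- 	for i in range(dimx * dimy):
-- 		if i < len(flatlist):
-- 			reclist.append(flatlist[i])
-- 		else:
-- 			reclist.append(None)
-- 	nests = []
-- 	sub = []
-- 	for i in range(len(reclist)):
-- 		sub.append(reclist[i])
-- 		if len(sub) == dimx:
-- 			nests.insert(0, sub)
-- 			sub = []
-- 	return nests
-- ===== SOURCE B (Python) =====
-- def PileUpList(flatlist, dimx, dimy):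
--     if dimx <= 0 or dimy <= 0:
--         return []
--     n = len(flatlist)
--     return [[flatlist[r * dimx + c] if r * dimx + c < n else None for c in range(dimx)]
--             for r in range(dimy - 1, -1, -1)]
-- ===== Notes on version B (the rewrite author's own statement) =====
-- stated objective: simpler
-- what changed: B computes each output row directly by index (one nested comprehension over reversed row indices with padding inlined) instead of A's two passes that first materialize a padded flat list and then chunk it while prepending rows; non-positive dimensions return [] up front.
import Mathlib
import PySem

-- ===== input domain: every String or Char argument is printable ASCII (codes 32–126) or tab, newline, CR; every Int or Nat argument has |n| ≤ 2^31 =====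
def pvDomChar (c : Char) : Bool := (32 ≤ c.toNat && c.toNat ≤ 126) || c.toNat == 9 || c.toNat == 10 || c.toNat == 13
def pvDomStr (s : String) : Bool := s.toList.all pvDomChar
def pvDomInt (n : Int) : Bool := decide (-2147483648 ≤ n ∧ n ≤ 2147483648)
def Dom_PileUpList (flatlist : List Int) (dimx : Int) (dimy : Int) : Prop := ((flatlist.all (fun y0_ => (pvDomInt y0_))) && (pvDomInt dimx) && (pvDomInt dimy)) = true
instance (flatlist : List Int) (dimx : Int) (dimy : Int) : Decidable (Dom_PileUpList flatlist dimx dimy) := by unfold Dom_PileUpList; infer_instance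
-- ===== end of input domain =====

-- B builds each reversed row directly by index with padding inlined, instead of A's
-- pad-then-chunk two-pass construction; same return value on all inputs (A is total).


-- ===== PORT A =====
-- step of A's second loop: sub.append(reclist[i]); if len(sub)==dimx: nests.insert(0,sub); sub=[]
def pileStep (dimx : Int) (st : List (List (Option Int)) × List (Option Int)) (v : Option Int) :
    List (List (Option Int)) × List (Option Int) :=
  let sub := st.2 ++ [v]
  if (sub.length : Int) = dimx then (sub :: st.1, []) else (st.1, sub)

def PileUpList (flatlist : List Int) (dimx : Int) (dimy : Int) : List (List (Option Int)) :=
  -- first loop: reclist.append(flatlist[i]) / None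
  let reclist : List (Option Int) :=
    (PySem.List.pyRange 0 (dimx * dimy) 1).foldl
      (fun acc i => acc ++ [if i < (flatlist.length : Int) then PySem.List.pyGet? flatlist i else none]) []
  -- second loop over range(len(reclist)), reading reclist[i]
  let st :=
    (PySem.List.pyRange 0 (reclist.length : Int) 1).foldl
      (fun st i => pileStep dimx st (PySem.List.pyGetD reclist i none)) ([], [])
  st.1

-- ===== PORT B =====
def PileUpList_alt (flatlist : List Int) (dimx : Int) (dimy : Int) : List (List (Option Int)) :=
  if dimx ≤ 0 ∨ dimy ≤ 0 then []
  else
    (PySem.List.pyRange (dimy - 1) (-1) (-1)).map (fun r =>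
      (PySem.List.pyRange 0 dimx 1).map (fun c =>
        if r * dimx + c < (flatlist.length : Int) then PySem.List.pyGet? flatlist (r * dimx + c) else none))

-- ===== PRECONDITION & SPEC =====
def Spec_PileUpList (flatlist : List Int) (dimx : Int) (dimy : Int) (out : List (List (Option Int))) : Prop := out = PileUpList_alt flatlist dimx dimy
instance (flatlist : List Int) (dimx : Int) (dimy : Int) (out : List (List (Option Int))) : Decidable (Spec_PileUpList flatlist dimx dimy out) := by unfold Spec_PileUpList; infer_instance

-- ===== CLAIM (what is proved, stated in full; the proofs are below) =====
def Claim_equal_PileUpList : Prop := ∀ (flatlist : List Int) (dimx : Int) (dimy : Int), Dom_PileUpList flatlist dimx dimy → Spec_PileUpList flatlist dimx dimy (PileUpList flatlist dimx dimy)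

-- ===== LEMMAS AND PROOFS =====

-- reversed chunk list: revChunks x y l = [chunk (y-1), ..., chunk 1, chunk 0] of l in blocks of x
def revChunks (x : Nat) : Nat → List (Option Int) → List (List (Option Int))
  | 0, _ => []
  | y + 1, l => revChunks x y (l.drop x) ++ [l.take x]

-- with non-positive dimx the flush condition never fires, so nests stays as it started
theorem pileStep_fold_nonpos (dimx : Int) (hx : dimx ≤ 0) :
    ∀ (l : List (Option Int)) (st : List (List (Option Int)) × List (Option Int)),
      (l.foldl (pileStep dimx) st).1 = st.1 := by
  intro l
  induction l with
  | nil => intro st; rfl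
  | cons v t ih =>
    intro st
    simp only [List.foldl_cons]
    rw [ih]
    have hcond : ¬ (((st.2).length : Int) + 1 = dimx) := by
      have : (0:Int) ≤ ((st.2).length : Int) := Int.natCast_nonneg _
      omega
    simp [pileStep, hcond]

-- consuming exactly one full chunk flushes it onto nests
theorem pileStep_fold_chunk (dimx : Int) :
    ∀ (c : List (Option Int)) (sub : List (Option Int)) (acc : List (List (Option Int))),
      ((sub.length : Int) + (c.length : Int) = dimx) → ((sub.length : Int) < dimx) →
      c.foldl (pileStep dimx) (acc, sub) = ((sub ++ c) :: acc, []) := by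
  intro c
  induction c with
  | nil =>
    intro sub acc hsum hlt
    simp only [List.length_nil, Nat.cast_zero, add_zero] at hsum
    omega
  | cons v t ih =>
    intro sub acc hsum hlt
    simp only [List.length_cons] at hsum
    push_cast at hsum
    simp only [List.foldl_cons, pileStep, List.length_append, List.length_cons, List.length_nil]
    push_cast
    by_cases h : ((sub.length : Int) + 1 = dimx)
    · have ht : t = [] := by
        have h0 : (t.length : Int) = 0 := by omega
        exact List.eq_nil_of_length_eq_zero (by exact_mod_cast h0)
      subst ht
      simp [h]
    · simp only [h, if_false]
      rw [ih (sub ++ [v]) acc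
        (by simp only [List.length_append, List.length_cons, List.length_nil]; push_cast; omega)
        (by simp only [List.length_append, List.length_cons, List.length_nil]; push_cast; omega)]
      simp

-- the whole second loop over a list of length x*y produces the reversed chunks
theorem pileStep_fold_all (x : Nat) (hx : 0 < x) :
    ∀ (y : Nat) (l : List (Option Int)) (acc : List (List (Option Int))),
      l.length = x * y →
      l.foldl (pileStep (x : Int)) (acc, []) = (revChunks x y l ++ acc, []) := by
  intro y
  induction y with
  | zero =>
    intro l acc hlen
    simp only [Nat.mul_zero] at hlen
    rw [List.eq_nil_of_length_eq_zero hlen]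
    rfl
  | succ y ih =>
    intro l acc hlen
    have hxle : x ≤ l.length := by
      rw [hlen, Nat.mul_succ]; omega
    have htake : (l.take x).length = x := by
      rw [List.length_take]; omega
    conv_lhs => rw [← List.take_append_drop x l]
    rw [List.foldl_append]
    rw [pileStep_fold_chunk (x : Int) (l.take x) [] acc
        (by simp only [List.length_nil, Nat.cast_zero, zero_add, htake])
        (by simp only [List.length_nil, Nat.cast_zero]; exact_mod_cast hx)]
    simp only [List.nil_append]
    rw [ih (l.drop x) ((l.take x) :: acc)
        (by rw [List.length_drop, hlen, Nat.mul_succ]; omega)]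
    simp [revChunks]

-- revChunks as a reversed map of take/drop blocks
theorem revChunks_eq_map (x : Nat) :
    ∀ (y : Nat) (l : List (Option Int)),
      revChunks x y l = ((List.range y).map (fun r => (l.drop (r * x)).take x)).reverse := by
  intro y
  induction y with
  | zero => intro l; rfl
  | succ y ih =>
    intro l
    rw [List.range_succ_eq_map]
    simp only [List.map_cons, List.reverse_cons, List.map_map, Nat.zero_mul, List.drop_zero]
    rw [revChunks, ih (l.drop x)]
    congr 1
    congr 1
    apply List.map_congr_left
    intro r _
    simp only [Function.comp_apply, List.drop_drop]
    congr 2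
    simp [Nat.succ_mul]
    omega

theorem PileUpList_spec' : ∀ (flatlist : List Int) (dimx : Int) (dimy : Int),
    PileUpList flatlist dimx dimy = PileUpList_alt flatlist dimx dimy := by
  intro flatlist dimx dimy
  by_cases hneg : dimx ≤ 0 ∨ dimy ≤ 0
  · -- B returns []; A's flush never fires (or everything is empty)
    unfold PileUpList PileUpList_alt
    simp only [hneg, if_true]
    rw [PySem.List.foldl_append_singleton_eq_map (fun i =>
      if i < (flatlist.length : Int) then PySem.List.pyGet? flatlist i else none)]
    simp only [List.nil_append]
    rw [PySem.List.foldl_pyRange_zero_pyGetD']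
    by_cases hx : dimx ≤ 0
    · exact pileStep_fold_nonpos dimx hx _ _
    · -- dimx > 0 so dimy ≤ 0, hence the padded list is empty
      have hdy : dimy ≤ 0 := by
        rcases hneg with h | h
        · exact absurd h hx
        · exact h
      have hprod : dimx * dimy ≤ 0 :=
        mul_nonpos_of_nonneg_of_nonpos (by omega) hdy
      rw [PySem.List.pyRange_one_eq_nil hprod]
      rfl
  · rw [not_or] at hneg
    obtain ⟨hx, hy⟩ := hneg
    have hxpos' : 0 < dimx := by omega
    have hypos' : 0 < dimy := by omega
    obtain ⟨x, hdx⟩ : ∃ x : Nat, dimx = (x : Int) := ⟨dimx.toNat, (Int.toNat_of_nonneg (by omega)).symm⟩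
    obtain ⟨y, hdy⟩ : ∃ y : Nat, dimy = (y : Int) := ⟨dimy.toNat, (Int.toNat_of_nonneg (by omega)).symm⟩
    subst hdx hdy
    have hxpos : 0 < x := by exact_mod_cast hxpos'
    have hypos : 0 < y := by exact_mod_cast hypos'
    unfold PileUpList PileUpList_alt
    have hnotneg : ¬ ((x : Int) ≤ 0 ∨ (y : Int) ≤ 0) := by
      rw [not_or]
      exact ⟨by omega, by omega⟩
    simp only [hnotneg, if_false]
    -- A's padded flat list is a map over range (x*y)
    rw [PySem.List.foldl_append_singleton_eq_map (fun i =>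
      if i < (flatlist.length : Int) then PySem.List.pyGet? flatlist i else none)]
    simp only [List.nil_append]
    have hprod : (x : Int) * (y : Int) = ((x * y : Nat) : Int) := by push_cast; ring
    rw [hprod, PySem.List.pyRange_zero_nat (x*y), List.map_map]
    rw [PySem.List.foldl_pyRange_zero_pyGetD']
    rw [pileStep_fold_all x hxpos y _ [] (by simp)]
    simp only [List.append_nil]
    rw [revChunks_eq_map]
    -- B side: the countdown row range is the reverse of range y
    rw [PySem.List.pyRange_neg_one_eq_reverse]
    have h02 : ((y : Int) - 1 + 1) = ((y : Nat) : Int) := by ring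
    rw [h02, (by norm_num : (-1 : Int) + 1 = 0), PySem.List.pyRange_zero_nat y,
        List.map_reverse, List.map_map]
    congr 1
    apply List.map_congr_left
    intro r hr
    have hry : r < y := List.mem_range.mp hr
    have hblock : x * (r + 1) ≤ x * y := Nat.mul_le_mul_left x hry
    have hblock' : x * (r + 1) = r * x + x := by ring
    -- row r of A's chunks equals B's row r, elementwise
    apply List.ext_getElem
    · simp only [List.length_take, List.length_drop, List.length_map, List.length_range,
        Function.comp_apply, PySem.List.pyRange_zero_nat x]
      omega
    · intro c hc1 hc2
      have hcx : c < x := by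
        simp only [List.length_take, List.length_drop, List.length_map, List.length_range] at hc1
        omega
      have hidx : r * x + c < x * y := by omega
      rw [List.getElem_take, List.getElem_drop]
      simp only [Function.comp_apply, List.getElem_map, List.getElem_range,
        PySem.List.pyRange_zero_nat x]
      have harg : ((r : Int)) * (x : Int) + ((c : Nat) : Int) = (((r * x + c : Nat)) : Int) := by
        push_cast; ring
      rw [harg]

-- ===== VERDICT (by name: the statement is the Claim_ definition above) =====
theorem PileUpList_spec : Claim_equal_PileUpList := by
  intro flatlist dimx dimy _
  exact PileUpList_spec' flatlist dimx dimy
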